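-- pv_equiv track=rewrite | github.com/DavidMello01/tcc-simulador-analise-sintatica | backend/app/parsing_table.py | enhance_action_table_with_suggestions
-- ===== SOURCE A (Python) =====
-- def enhance_action_table_with_suggestions(action_table):
--     enhanced_table = {}
--     for token in action_table:
--         enhanced_table[token] = {}
--         for state in action_table[token]:
--             if action_table[token][state] == "ERRO!":
--                 # Add specific suggestions based on state and token
--                 if token == ";" and state == 0:
--                     enhanced_table[token][state] = "ERRO! Sugestão: Remova ';' ou insira 'a'/'(' antes"
--                 elif token == "$" and state == 0:
--                     enhanced_table[token][state] = "ERRO! Sugestão: Insira 'a' ou '('"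
--                 elif token == ")" and state in [0, 1, 2, 5, 7, 8]:
--                     enhanced_table[token][state] = "ERRO! Sugestão: Remova ')' ou insira '(' antes"
--                 elif token == "a" and state in [2, 5, 8]:
--                     enhanced_table[token][state] = "ERRO! Sugestão: Insira ';' entre os 'a's"
--                 else:
--                     expected = []
--                     for t in action_table:
--                         if action_table[t].get(state, "") != "ERRO!":
--                             expected.append(t)
--                     enhanced_table[token][state] = f"ERRO! Esperava: {', '.join(expected)}"
--             else:
--                 enhanced_table[token][state] = action_table[token][state]
--     return enhanced_table
-- ===== SOURCE B (Python) =====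
-- def enhance_action_table_with_suggestions(action_table):
--     # Static lookup table for the special-case suggestions, (token, state) -> message.
--     specials = {(";", 0): "ERRO! Sugestão: Remova ';' ou insira 'a'/'(' antes",
--                 ("$", 0): "ERRO! Sugestão: Insira 'a' ou '('"}
--     for st in (0, 1, 2, 5, 7, 8):
--         specials[(")", st)] = "ERRO! Sugestão: Remova ')' ou insira '(' antes"
--     for st in (2, 5, 8):
--         specials[("a", st)] = "ERRO! Sugestão: Insira ';' entre os 'a's"
--     # First pass: one 'expected tokens' message per state seen anywhere in the table
--     # (a token whose row lacks the state counts as expected, like .get(state, '') != 'ERRO!').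
--     states = {s for row in action_table.values() for s in row}
--     expected_msg = {
--         s: "ERRO! Esperava: " + ", ".join(
--             t for t in action_table if action_table[t].get(s, "") != "ERRO!")
--         for s in states}
--     # Second pass: rewrite each error cell by lookup.
--     return {token: {state: (specials.get((token, state)) or expected_msg[state])
--                     if value == "ERRO!" else value
--                     for state, value in row.items()}
--             for token, row in action_table.items()}
-- ===== Notes on version B (the rewrite author's own statement) =====
-- stated objective: simpler
-- what changed: Replaces A's per-error-cell rescan of the whole table and its inline if/elif ladder with two passes: a precomputed per-state 'expected tokens' message index and a static (token, state) -> suggestion lookup table.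
import Mathlib
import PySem

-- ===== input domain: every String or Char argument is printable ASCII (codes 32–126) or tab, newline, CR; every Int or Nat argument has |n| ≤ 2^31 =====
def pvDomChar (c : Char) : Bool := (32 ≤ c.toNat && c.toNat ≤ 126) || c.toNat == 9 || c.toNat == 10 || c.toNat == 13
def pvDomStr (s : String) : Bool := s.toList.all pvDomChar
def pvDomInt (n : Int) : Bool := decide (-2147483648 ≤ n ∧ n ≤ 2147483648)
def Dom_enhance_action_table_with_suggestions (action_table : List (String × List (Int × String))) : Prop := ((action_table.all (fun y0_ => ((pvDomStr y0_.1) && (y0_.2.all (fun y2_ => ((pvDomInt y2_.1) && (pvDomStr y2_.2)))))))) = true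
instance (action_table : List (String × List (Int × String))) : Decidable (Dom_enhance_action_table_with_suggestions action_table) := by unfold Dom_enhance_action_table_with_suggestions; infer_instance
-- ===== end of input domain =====

-- B replaces A's per-error-cell rescan and if/elif ladder by a precomputed per-state
-- message index and a static (token, state) → suggestion lookup table (objective: simpler).
-- The association lists encode Python dicts (lookup = first match, as PySem prescribes).

-- ===== PORT A =====
-- action_table[t].get(state, "") : dict .get with default "" (first match in the row)
def pvRowGetD (row : List (Int × String)) (s : Int) : String :=
  match row with
  | [] => ""
  | (k, v) :: rest => if k = s then v else pvRowGetD rest s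

-- the inner 'expected' loop of A: for t in action_table: if .get(state,"") != "ERRO!": append t
def pvExpectedA (tbl : List (String × List (Int × String))) (state : Int) : List String :=
  tbl.foldl (fun acc p => if pvRowGetD p.2 state != "ERRO!" then acc ++ [p.1] else acc) []

-- the body assigning enhanced_table[token][state]
def pvCellA (tbl : List (String × List (Int × String))) (tok : String) (st : Int) (v : String) : String :=
  if v = "ERRO!" then
    if tok = ";" ∧ st = 0 then "ERRO! Sugestão: Remova ';' ou insira 'a'/'(' antes"
    else if tok = "$" ∧ st = 0 then "ERRO! Sugestão: Insira 'a' ou '('"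
    else if tok = ")" ∧ st ∈ ([0, 1, 2, 5, 7, 8] : List Int) then "ERRO! Sugestão: Remova ')' ou insira '(' antes"
    else if tok = "a" ∧ st ∈ ([2, 5, 8] : List Int) then "ERRO! Sugestão: Insira ';' entre os 'a's"
    else "ERRO! Esperava: " ++ PySem.Str.join ", " (pvExpectedA tbl st)
  else v

def enhance_action_table_with_suggestions (action_table : List (String × List (Int × String))) : List (String × List (Int × String)) :=
  action_table.map (fun p => (p.1, p.2.map (fun q => (q.1, pvCellA action_table p.1 q.1 q.2))))

-- ===== PORT B =====
-- first-match association-list lookup (dict .get returning None when absent)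
def pvAssocGet? {α β : Type} [DecidableEq α] (l : List (α × β)) (k : α) : Option β :=
  match l with
  | [] => none
  | p :: rest => if k = p.1 then some p.2 else pvAssocGet? rest k

-- the static 'specials' table of Source B: two seed entries plus the two expansion loops
def pvSpecialsB : List ((String × Int) × String) :=
  [(((";" : String), (0 : Int)), "ERRO! Sugestão: Remova ';' ou insira 'a'/'(' antes"),
   ((("$" : String), (0 : Int)), "ERRO! Sugestão: Insira 'a' ou '('")]
  ++ (([0, 1, 2, 5, 7, 8] : List Int).map (fun st => (((")" : String), st), "ERRO! Sugestão: Remova ')' ou insira '(' antes")))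
  ++ (([2, 5, 8] : List Int).map (fun st => ((("a" : String), st), "ERRO! Sugestão: Insira ';' entre os 'a's")))

-- pass 1 of Source B: the set of states seen anywhere, each mapped to its 'expected' message
-- (the dict is only looked up afterwards, so the Set's order never reaches the output)
def pvExpectedMsgB (tbl : List (String × List (Int × String))) : List (Int × String) :=
  (PySem.Set.ofList (tbl.flatMap (fun p => p.2.map (·.1)))).map
    (fun s => (s, "ERRO! Esperava: " ++ PySem.Str.join ", "
      ((tbl.filter (fun p => pvRowGetD p.2 s != "ERRO!")).map (·.1))))

-- pass 2 of Source B; 'specials.get(..) or expected_msg[state]' is Option.getD because every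
-- specials value is a non-empty (truthy) string, and expected_msg[state] never raises
-- because the state occurs in the current row (hence in pass 1's set) — hence .getD "".
def enhance_action_table_with_suggestions_alt (action_table : List (String × List (Int × String))) : List (String × List (Int × String)) :=
  let msgs := pvExpectedMsgB action_table
  action_table.map (fun p => (p.1, p.2.map (fun q =>
    (q.1, if q.2 = "ERRO!" then
            (pvAssocGet? pvSpecialsB (p.1, q.1)).getD ((pvAssocGet? msgs q.1).getD "")
          else q.2))))

-- ===== PRECONDITION & SPEC =====
def Spec_enhance_action_table_with_suggestions (action_table : List (String × List (Int × String))) (out : List (String × List (Int × String))) : Prop := out = enhance_action_table_with_suggestions_alt action_table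
instance (action_table : List (String × List (Int × String))) (out : List (String × List (Int × String))) : Decidable (Spec_enhance_action_table_with_suggestions action_table out) := by unfold Spec_enhance_action_table_with_suggestions; infer_instance

-- ===== CLAIM (what is proved, stated in full; the proofs are below) =====
def Claim_equal_enhance_action_table_with_suggestions : Prop := ∀ (action_table : List (String × List (Int × String))), Dom_enhance_action_table_with_suggestions action_table → Spec_enhance_action_table_with_suggestions action_table (enhance_action_table_with_suggestions action_table)

-- ===== LEMMAS AND PROOFS =====

-- B's static table, read back as A's if/elif ladder (with default m)
set_option maxHeartbeats 2000000 in
theorem pvSpecials_lookup (tok : String) (st : Int) (m : String) :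
    (pvAssocGet? pvSpecialsB (tok, st)).getD m =
    if tok = ";" ∧ st = 0 then "ERRO! Sugestão: Remova ';' ou insira 'a'/'(' antes"
    else if tok = "$" ∧ st = 0 then "ERRO! Sugestão: Insira 'a' ou '('"
    else if tok = ")" ∧ st ∈ ([0, 1, 2, 5, 7, 8] : List Int) then "ERRO! Sugestão: Remova ')' ou insira '(' antes"
    else if tok = "a" ∧ st ∈ ([2, 5, 8] : List Int) then "ERRO! Sugestão: Insira ';' entre os 'a's"
    else m := by
  by_cases h1 : tok = ";"
  · subst h1; simp only [pvSpecialsB, List.map, List.cons_append, List.nil_append, pvAssocGet?,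
      Prod.mk.injEq]
    split_ifs <;> simp_all
  by_cases h2 : tok = "$"
  · subst h2; simp only [pvSpecialsB, List.map, List.cons_append, List.nil_append, pvAssocGet?,
      Prod.mk.injEq]
    split_ifs <;> simp_all
  by_cases h3 : tok = ")"
  · subst h3; simp only [pvSpecialsB, List.map, List.cons_append, List.nil_append, pvAssocGet?,
      Prod.mk.injEq]
    split_ifs <;> simp_all
  by_cases h4 : tok = "a"
  · subst h4; simp only [pvSpecialsB, List.map, List.cons_append, List.nil_append, pvAssocGet?,
      Prod.mk.injEq]
    split_ifs <;> simp_all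
  simp [pvSpecialsB, pvAssocGet?, h1, h2, h3, h4]

-- looking up a key in a keyed map over a list containing it
theorem pvAssocGet_map_self {α β : Type} [DecidableEq α] (l : List α) (f : α → β) (k : α)
    (h : k ∈ l) : pvAssocGet? (l.map (fun s => (s, f s))) k = some (f k) := by
  induction l with
  | nil => cases h
  | cons x xs ih =>
    rcases List.mem_cons.mp h with h | h
    · subst h; simp [pvAssocGet?]
    · by_cases hx : k = x
      · subst hx; simp [pvAssocGet?]
      · simp [pvAssocGet?, hx, ih h]

-- A's expected-tokens loop is B's filter-and-project
theorem pvExpectedA_eq (tbl : List (String × List (Int × String))) (st : Int) :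
    pvExpectedA tbl st = (tbl.filter (fun p => pvRowGetD p.2 st != "ERRO!")).map (·.1) := by
  unfold pvExpectedA
  rw [PySem.List.foldl_append_if]
  simp

theorem enhance_action_table_with_suggestions_spec : Claim_equal_enhance_action_table_with_suggestions := by
  intro tbl _
  unfold Spec_enhance_action_table_with_suggestions
  unfold enhance_action_table_with_suggestions enhance_action_table_with_suggestions_alt
  apply List.map_congr_left
  intro p hp
  refine congrArg _ ?_
  apply List.map_congr_left
  intro q hq
  refine congrArg _ ?_
  rw [pvSpecials_lookup]
  unfold pvCellA
  by_cases hv : q.2 = "ERRO!"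
  · simp only [hv, if_true]
    refine if_congr Iff.rfl rfl (if_congr Iff.rfl rfl (if_congr Iff.rfl rfl
      (if_congr Iff.rfl rfl ?_)))
    -- the default branch: the precomputed message for q.1
    have hmem : q.1 ∈ PySem.Set.ofList (tbl.flatMap (fun p => p.2.map (·.1))) := by
      rw [PySem.Set.mem_ofList]
      exact List.mem_flatMap.mpr ⟨p, hp, List.mem_map.mpr ⟨q, hq, rfl⟩⟩
    rw [pvExpectedMsgB, pvAssocGet_map_self _ _ _ hmem]
    simp [pvExpectedA_eq]
  · simp [hv]
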